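-- pv_equiv track=rewrite | github.com/sarah-suess/python | HW06.py | findEvent
-- ===== SOURCE A (Python) =====
-- def findEvent(myInterests, schedule):
--     matchList = []
--     for key in schedule:
--         dayList = schedule[key]
--         for event in dayList:
--             if event in myInterests:
--                 matchList.append(key)
--     matchList = list(set(matchList))
--     matchList.sort()
--     return matchList
-- ===== SOURCE B (Python) =====
-- def findEvent(myInterests, schedule):
--     # Inverted index: event -> set of day keys whose list contains it.
--     index = {}
--     for key, events in schedule.items():
--         for e in events:
--             index.setdefault(e, set()).add(key)
--     days = set()
--     for interest in myInterests:
--         days |= index.get(interest, set())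
--     return sorted(days)
-- ===== Notes on version B (the rewrite author's own statement) =====
-- stated objective: faster
-- what changed: B replaces A's scan-each-day-and-test-each-event-with-a-linear-membership-check loop by building an inverted index (event -> set of day keys) in one pass over the schedule and then querying that index once per interest, unioning the day sets; the loop nesting is inverted and hash lookups replace the per-event linear scan of myInterests.
import Mathlib
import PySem

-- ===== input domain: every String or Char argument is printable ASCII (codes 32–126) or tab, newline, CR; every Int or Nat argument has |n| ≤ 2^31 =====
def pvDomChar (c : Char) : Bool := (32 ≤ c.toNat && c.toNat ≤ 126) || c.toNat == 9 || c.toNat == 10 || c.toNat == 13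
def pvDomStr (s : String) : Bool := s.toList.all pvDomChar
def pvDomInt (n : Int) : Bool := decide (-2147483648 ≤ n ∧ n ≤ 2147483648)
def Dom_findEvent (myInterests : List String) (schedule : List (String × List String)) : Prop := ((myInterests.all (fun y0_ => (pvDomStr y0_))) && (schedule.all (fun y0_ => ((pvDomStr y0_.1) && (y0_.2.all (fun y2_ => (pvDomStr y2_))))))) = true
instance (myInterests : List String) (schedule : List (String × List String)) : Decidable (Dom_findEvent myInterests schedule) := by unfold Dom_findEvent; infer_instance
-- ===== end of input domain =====

-- B builds an inverted index (event -> set of day keys) and queries it per interest,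
-- instead of A's per-day scan testing each event against myInterests; same sorted result.


-- ===== PORT A =====
-- 'for key in schedule: dayList = schedule[key]; for event in dayList: if event in myInterests: matchList.append(key)'
-- then 'list(set(matchList)); matchList.sort()'. The dict lookup schedule[key] is Dict.getD on the association list.
def findEvent (myInterests : List String) (schedule : List (String × List String)) : List String :=
  let matchList : List String :=
    schedule.foldl (fun acc kv =>
      let dayList := (PySem.Dict.mk schedule).getD kv.1 []
      dayList.foldl (fun acc2 event =>
        if myInterests.contains event then acc2 ++ [kv.1] else acc2) acc) []
  PySem.List.sorted (PySem.Set.ofList matchList) (fun x => x) false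

-- ===== PORT B =====
-- index.setdefault(e, set()).add(key)  ==  index[e] = index.get(e, set()) ∪ {key}  ==  Dict.modify e [] (add · key)
def findEvent_alt (myInterests : List String) (schedule : List (String × List String)) : List String :=
  let idx : PySem.Dict String (PySem.Set String) :=
    schedule.foldl (fun d kv =>
      kv.2.foldl (fun d e => d.modify e [] (fun st => PySem.Set.add st kv.1)) d) PySem.Dict.empty
  let days : PySem.Set String :=
    myInterests.foldl (fun acc interest => PySem.Set.union acc (idx.getD interest [])) PySem.Set.empty
  PySem.List.sorted days (fun x => x) false

-- ===== PRECONDITION & SPEC =====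
-- Pre_ excludes association lists with duplicate day keys: a Python dict cannot hold them,
-- so no input on which the Python A returns is excluded.
def Pre_findEvent (myInterests : List String) (schedule : List (String × List String)) : Prop :=
  (schedule.map Prod.fst).Nodup
instance (myInterests : List String) (schedule : List (String × List String)) : Decidable (Pre_findEvent myInterests schedule) := by unfold Pre_findEvent; infer_instance
def pvWitness_findEvent : List String × (List (String × List String)) :=
  (["x", "y"], [("mon", ["x", "z"]), ("tue", ["y"])])
def Spec_findEvent (myInterests : List String) (schedule : List (String × List String)) (out : List String) : Prop := out = findEvent_alt myInterests schedule
instance (myInterests : List String) (schedule : List (String × List String)) (out : List String) : Decidable (Spec_findEvent myInterests schedule out) := by unfold Spec_findEvent; infer_instance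

-- ===== CLAIM (what is proved, stated in full; the proofs are below) =====
def Claim_equal_findEvent : Prop := ∀ (myInterests : List String) (schedule : List (String × List String)), Dom_findEvent myInterests schedule → Pre_findEvent myInterests schedule → Spec_findEvent myInterests schedule (findEvent myInterests schedule)

-- ===== LEMMAS AND PROOFS =====

-- inner index loop over one day's event list
theorem mem_getD_foldl_modify_add (events : List String) (k : String)
    (d : PySem.Dict String (PySem.Set String)) (e x : String) :
    x ∈ (events.foldl (fun d e => d.modify e [] (fun st => PySem.Set.add st k)) d).getD e [] ↔
      x ∈ d.getD e [] ∨ (x = k ∧ e ∈ events) := by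
  induction events generalizing d with
  | nil => simp
  | cons hd tl ih =>
      simp only [List.foldl_cons, ih, PySem.Dict.getD_modify, List.mem_cons]
      split_ifs with h
      · subst h
        simp [PySem.Set.mem_add]
        tauto
      · tauto

-- the whole index: which days a given event maps to
theorem mem_getD_index (schedule : List (String × List String))
    (d : PySem.Dict String (PySem.Set String)) (e x : String) :
    x ∈ (schedule.foldl (fun d kv =>
        kv.2.foldl (fun d e => d.modify e [] (fun st => PySem.Set.add st kv.1)) d) d).getD e [] ↔
      x ∈ d.getD e [] ∨ ∃ kv ∈ schedule, kv.1 = x ∧ e ∈ kv.2 := by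
  induction schedule generalizing d with
  | nil => simp
  | cons hd tl ih =>
      simp only [List.foldl_cons, ih, mem_getD_foldl_modify_add, List.mem_cons]
      constructor
      · rintro (⟨h | ⟨rfl, he⟩⟩ | ⟨kv, hkv, h1, h2⟩)
        · exact Or.inl h
        · exact Or.inr ⟨hd, Or.inl rfl, rfl, he⟩
        · exact Or.inr ⟨kv, Or.inr hkv, h1, h2⟩
      · rintro (h | ⟨kv, hkv | hkv, h1, h2⟩)
        · exact Or.inl (Or.inl h)
        · subst hkv; exact Or.inl (Or.inr ⟨h1.symm, h2⟩)
        · exact Or.inr ⟨kv, hkv, h1, h2⟩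

-- the union loop over the interests
theorem mem_foldl_union {α : Type} [BEq α] [LawfulBEq α] (f : α → PySem.Set α)
    (l : List α) (acc : PySem.Set α) (x : α) :
    x ∈ l.foldl (fun acc i => PySem.Set.union acc (f i)) acc ↔
      x ∈ acc ∨ ∃ i ∈ l, x ∈ f i := by
  induction l generalizing acc with
  | nil => simp
  | cons hd tl ih =>
      simp only [List.foldl_cons, ih, PySem.Set.mem_union, List.mem_cons]
      constructor
      · rintro (⟨h | h⟩ | ⟨i, hi, hx⟩)
        · exact Or.inl h
        · exact Or.inr ⟨hd, Or.inl rfl, h⟩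
        · exact Or.inr ⟨i, Or.inr hi, hx⟩
      · rintro (h | ⟨i, hi | hi, hx⟩)
        · exact Or.inl (Or.inl h)
        · subst hi; exact Or.inl (Or.inr hx)
        · exact Or.inr ⟨i, hi, hx⟩

theorem nodup_foldl_union {α : Type} [BEq α] [LawfulBEq α] (f : α → PySem.Set α)
    (l : List α) (acc : PySem.Set α) (h : acc.Nodup) :
    (l.foldl (fun acc i => PySem.Set.union acc (f i)) acc).Nodup := by
  induction l generalizing acc with
  | nil => exact h
  | cons hd tl ih => exact ih _ (PySem.Set.nodup_union _ _ h)

-- A's matchList membership: x is appended iff x is a day whose (looked-up) list has a matching event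
theorem mem_matchList (myInterests : List String) (schedule : List (String × List String)) (x : String) :
    x ∈ schedule.foldl (fun acc kv =>
        ((PySem.Dict.mk schedule).getD kv.1 []).foldl (fun acc2 event =>
          if myInterests.contains event then acc2 ++ [kv.1] else acc2) acc) [] ↔
      ∃ kv ∈ schedule, kv.1 = x ∧
        ∃ e ∈ (PySem.Dict.mk schedule).getD kv.1 [], myInterests.contains e := by
  have hfun : (fun (acc : List String) (kv : String × List String) =>
      ((PySem.Dict.mk schedule).getD kv.1 []).foldl (fun acc2 event =>
        if myInterests.contains event then acc2 ++ [kv.1] else acc2) acc)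
    = (fun acc kv => acc ++ (((PySem.Dict.mk schedule).getD kv.1 []).filter
        (fun event => myInterests.contains event)).map (fun _ => kv.1)) := by
    funext acc kv; exact PySem.List.foldl_append_if _ _ _ _
  rw [hfun, PySem.List.foldl_append_eq_flatMap]
  simp only [List.nil_append, List.mem_flatMap, List.mem_map, List.mem_filter]
  constructor
  · rintro ⟨kv, hkv, e, ⟨he, hc⟩, rfl⟩
    exact ⟨kv, hkv, rfl, e, he, hc⟩
  · rintro ⟨kv, hkv, rfl, e, he, hc⟩
    exact ⟨kv, hkv, e, ⟨he, hc⟩, rfl⟩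

-- with distinct keys, the lookup of a pair's own key returns its own value
theorem getD_mk_self (schedule : List (String × List String))
    (hnd : (schedule.map Prod.fst).Nodup) (kv : String × List String) (h : kv ∈ schedule) :
    (PySem.Dict.mk schedule).getD kv.1 [] = kv.2 := by
  exact PySem.Dict.getD_of_mem_items (d := PySem.Dict.mk schedule) (k := kv.1) (v := kv.2) h hnd []

-- ===== VERDICT (by name: the statement is the Claim_ definition above) =====
theorem findEvent_spec : Claim_equal_findEvent := by
  intro myInterests schedule _ hpre
  show _ = _
  unfold findEvent findEvent_alt
  simp only []
  rw [PySem.List.sorted_id_eq_sorted_id_iff_perm]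
  apply (List.perm_ext_iff_of_nodup (PySem.Set.nodup_ofList _)
          (nodup_foldl_union _ _ _ List.nodup_nil)).mpr
  intro x
  rw [PySem.Set.mem_ofList, mem_matchList, mem_foldl_union]
  simp only [List.not_mem_nil, false_or, mem_getD_index, PySem.Dict.getD_empty,
    List.not_mem_nil, false_or]
  constructor
  · rintro ⟨kv, hkv, rfl, e, he, hc⟩
    rw [getD_mk_self schedule hpre kv hkv] at he
    exact ⟨e, by simpa using hc, kv, hkv, rfl, he⟩
  · rintro ⟨i, hi, kv, hkv, rfl, hm⟩
    refine ⟨kv, hkv, rfl, i, ?_, by simpa using hi⟩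
    rw [getD_mk_self schedule hpre kv hkv]; exact hm
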